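-- pv_equiv track=rewrite | github.com/srtcbzncr/Location-Strategy-For-Emission-Remote-Sensing-Systems | functions.py | deleteEdgeFromPath
-- ===== SOURCE A (Python) =====
-- def deleteEdgeFromPath(Q, node):
--     i = 0;
--     while i < len(Q):
--         if Q[i][0] == node:
--             Q.pop(i)
--             i = i-1
--         i = i+1
--     return Q
-- ===== SOURCE B (Python) =====
-- def deleteEdgeFromPath(Q, node):
--     j = 0
--     for i in range(len(Q)):
--         if Q[i][0] != node:
--             Q[j] = Q[i]
--             j += 1
--     del Q[j:]
--     return Q
-- ===== Notes on version B (the rewrite author's own statement) =====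
-- stated objective: alternative
-- what changed: Replaced the pop-and-step-back while loop with a single forward two-pointer compaction (write index j, then truncate with del Q[j:]), still mutating the same list in place; avoids quadratic shifting only when many rows match, so measured speed is comparable.
import Mathlib
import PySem

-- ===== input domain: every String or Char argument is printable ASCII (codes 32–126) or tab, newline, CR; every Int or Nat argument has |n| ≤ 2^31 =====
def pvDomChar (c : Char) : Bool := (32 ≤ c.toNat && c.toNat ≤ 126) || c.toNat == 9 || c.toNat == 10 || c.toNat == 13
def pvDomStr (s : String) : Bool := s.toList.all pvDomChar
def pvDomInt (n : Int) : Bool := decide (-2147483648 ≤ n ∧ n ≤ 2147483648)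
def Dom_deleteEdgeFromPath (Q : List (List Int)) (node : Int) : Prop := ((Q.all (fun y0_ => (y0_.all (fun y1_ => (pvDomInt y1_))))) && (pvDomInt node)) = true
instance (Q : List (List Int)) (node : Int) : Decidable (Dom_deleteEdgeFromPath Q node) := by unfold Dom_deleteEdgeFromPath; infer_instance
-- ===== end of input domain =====

-- B replaces A's pop-and-step-back while loop by a single forward two-pointer compaction
-- (write index j, truncation at the end). Both Pythons mutate Q in place and return the same
-- list object; the equivalence proved here is about the returned value.

-- ===== PORT A =====
-- while i < len(Q): if Q[i][0] == node: Q.pop(i); i = i-1; i = i+1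
-- (the i = i-1 / i = i+1 pair after a pop leaves i unchanged, written as such here)
def delLoopA (node : Int) (Q : List (List Int)) (i : Nat) : List (List Int) :=
  if h : i < Q.length then
    let row := (PySem.List.pyGet? Q (i : Int)).getD []          -- Q[i]
    if (PySem.List.pyGet? row 0).getD 0 == node then            -- Q[i][0] == node (raise on [] excluded by Pre_)
      let rest := ((PySem.List.pop? Q (i : Int)).map Prod.snd).getD []   -- Q.pop(i)
      delLoopA node rest i                                      -- i-1 then i+1: i unchanged
    else
      delLoopA node Q (i + 1)
  else Q
termination_by Q.length - i
decreasing_by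
  · have hp := PySem.List.pop?_natCast (xs := Q) (n := i) h
    simp only [hp, Option.map_some, Option.getD_some]
    simp [List.length_eraseIdx, h]
    omega
  · omega

def deleteEdgeFromPath (Q : List (List Int)) (node : Int) : List (List Int) :=
  delLoopA node Q 0

-- ===== PORT B =====
-- j = 0; for i in range(len(Q)): if Q[i][0] != node: Q[j] = Q[i]; j += 1
-- then del Q[j:]  (keep the first j elements)
def compactLoopB (node : Int) (arr : List (List Int)) (j i n : Nat) : List (List Int) × Nat :=
  if i < n then
    let row := (PySem.List.pyGet? arr (i : Int)).getD []        -- Q[i]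
    if (PySem.List.pyGet? row 0).getD 0 != node then            -- Q[i][0] != node
      compactLoopB node (PySem.List.pySetD arr (j : Int) row) (j + 1) (i + 1) n   -- Q[j] = Q[i]; j += 1
    else
      compactLoopB node arr j (i + 1) n
  else (arr, j)
termination_by n - i

def deleteEdgeFromPath_alt (Q : List (List Int)) (node : Int) : List (List Int) :=
  let r := compactLoopB node Q 0 0 Q.length
  r.1.take r.2                                                  -- del Q[j:]

-- ===== PRECONDITION & SPEC =====
-- Pre_ excludes exactly the inputs where Python A raises: Q[i][0] is an IndexError on an empty row.
def Pre_deleteEdgeFromPath (Q : List (List Int)) (node : Int) : Prop :=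
  ∀ row ∈ Q, row ≠ []
instance (Q : List (List Int)) (node : Int) : Decidable (Pre_deleteEdgeFromPath Q node) := by
  unfold Pre_deleteEdgeFromPath; infer_instance
def pvWitness_deleteEdgeFromPath : List (List Int) × Int := ([[1, 2], [3, 4], [1, 5]], 1)

def Spec_deleteEdgeFromPath (Q : List (List Int)) (node : Int) (out : List (List Int)) : Prop := out = deleteEdgeFromPath_alt Q node
instance (Q : List (List Int)) (node : Int) (out : List (List Int)) : Decidable (Spec_deleteEdgeFromPath Q node out) := by unfold Spec_deleteEdgeFromPath; infer_instance

-- ===== CLAIM (what is proved, stated in full; the proofs are below) =====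
def Claim_equal_deleteEdgeFromPath : Prop := ∀ (Q : List (List Int)) (node : Int), Dom_deleteEdgeFromPath Q node → Pre_deleteEdgeFromPath Q node → Spec_deleteEdgeFromPath Q node (deleteEdgeFromPath Q node)

-- ===== LEMMAS AND PROOFS =====

-- the common keep-predicate of a row
def keepP (node : Int) (row : List Int) : Bool :=
  !((PySem.List.pyGet? row 0).getD 0 == node)

lemma delLoopA_eq_filter (node : Int) :
    ∀ Q i, delLoopA node Q i = Q.take i ++ (Q.drop i).filter (keepP node) := by
  intro Q i
  induction hm : Q.length - i using Nat.strong_induction_on generalizing Q i with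
  | _ m ih =>
  rw [delLoopA]
  by_cases h : i < Q.length
  · simp only [h, dif_pos]
    have htl : (Q.take i).length = i := List.length_take_of_le (by omega)
    have hget : PySem.List.pyGet? Q (i : Int) = some Q[i] := by
      simp [PySem.List.pyGet?_natCast, List.getElem?_eq_getElem h]
    have hdrop : Q.drop i = Q[i] :: Q.drop (i + 1) := List.drop_eq_getElem_cons h
    by_cases he : (PySem.List.pyGet? Q[i] 0).getD 0 == node
    · -- pop branch
      have hp := PySem.List.pop?_natCast (xs := Q) (n := i) h
      have hrest : ((PySem.List.pop? Q (i : Int)).map Prod.snd).getD [] = Q.eraseIdx i := by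
        simp [hp]
      have hkeep : keepP node Q[i] = false := by simp [keepP, he]
      rw [hget]
      simp only [Option.getD_some, he, if_pos, hrest]
      have hlen : (Q.eraseIdx i).length - i < m := by
        simp [List.length_eraseIdx, h]; omega
      rw [ih _ hlen _ _ rfl]
      have h1 : (Q.eraseIdx i).take i = Q.take i := by
        rw [List.eraseIdx_eq_take_drop_succ, List.take_append_of_le_length (by omega),
            List.take_take]
        simp
      have h2 : (Q.eraseIdx i).drop i = Q.drop (i + 1) := by
        rw [List.eraseIdx_eq_take_drop_succ, List.drop_append_of_le_length (by omega),
            List.drop_take]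
        simp
      rw [h1, h2, hdrop, List.filter_cons, hkeep]
      simp
    · -- keep branch
      rw [hget]
      simp only [Option.getD_some, he, if_neg, Bool.not_eq_true]
      have hkeep : keepP node Q[i] = true := by
        simp only [keepP, Bool.not_eq_true']
        exact Bool.eq_false_iff.mpr (fun hc => he hc)
      rw [ih (Q.length - (i + 1)) (by omega) _ _ rfl]
      have htk : Q.take (i + 1) = Q.take i ++ [Q[i]] := by
        rw [List.take_succ, List.getElem?_eq_getElem h]; rfl
      rw [htk, hdrop, List.filter_cons, hkeep, List.append_assoc]
      rfl
  · simp only [h, dif_neg, not_false_iff]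
    rw [List.take_of_length_le (by omega), List.drop_of_length_le (by omega)]
    simp

lemma compactLoopB_take (node : Int) (Q : List (List Int)) :
    ∀ i arr j, j ≤ i → arr.length = Q.length →
      arr.take j = (Q.take i).filter (keepP node) →
      arr.drop i = Q.drop i →
      (compactLoopB node arr j i Q.length).1.take (compactLoopB node arr j i Q.length).2
        = Q.filter (keepP node) := by
  intro i
  induction hm : Q.length - i using Nat.strong_induction_on generalizing i with
  | _ m ih =>
  intro arr j hji hlen htake hdrop
  rw [compactLoopB]
  by_cases h : i < Q.length
  · simp only [h, if_pos]
    have hiQ : i < arr.length := by omega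
    have hgetQ : arr[i]? = Q[i]? := by
      have := congrArg (fun l => l[0]?) hdrop
      simpa [List.getElem?_drop] using this
    have hget : PySem.List.pyGet? arr (i : Int) = some Q[i] := by
      rw [PySem.List.pyGet?_natCast, hgetQ, List.getElem?_eq_getElem h]
    have hdrop1 : arr.drop (i + 1) = Q.drop (i + 1) := by
      have hd : (arr.drop i).drop 1 = (Q.drop i).drop 1 := by rw [hdrop]
      simpa [List.drop_drop, Nat.add_comm] using hd
    have htakeQ : Q.take (i + 1) = Q.take i ++ [Q[i]] := by
      rw [List.take_succ, List.getElem?_eq_getElem h]; rfl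
    by_cases hk : keepP node Q[i] = true
    · have hne : ((PySem.List.pyGet? Q[i] 0).getD 0 != node) = true := by
        simpa [keepP] using hk
      rw [hget]
      simp only [Option.getD_some, hne, if_pos]
      have hjlt : j < arr.length := by omega
      have hset : PySem.List.pySetD arr (j : Int) Q[i] = arr.set j Q[i] :=
        PySem.List.pySetD_natCast ..
      rw [hset]
      apply ih (Q.length - (i + 1)) (by omega) (i + 1) rfl _ _ (by omega) (by simp [hlen])
      · -- take invariant
        have hjlt' : j < (arr.take (j + 1)).length := by
          rw [List.length_take_of_le (by omega)]; omega
        rw [List.take_set, List.set_eq_take_append_cons_drop, if_pos hjlt']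
        rw [List.take_take, List.drop_take]
        simp only [Nat.sub_self, List.take_zero]
        have hmin : min j (j + 1) = j := by omega
        rw [hmin, htake, htakeQ, List.filter_append, List.filter_cons, hk]
        simp
      · -- drop invariant
        rw [List.drop_set, if_pos (by omega)]
        exact hdrop1
    · have hne : ((PySem.List.pyGet? Q[i] 0).getD 0 != node) = false := by
        simpa [keepP] using hk
      rw [hget]
      simp only [Option.getD_some, hne, Bool.false_eq_true, if_neg, not_false_iff]
      apply ih (Q.length - (i + 1)) (by omega) (i + 1) rfl _ _ (by omega) hlen
      · rw [htake, htakeQ, List.filter_append, List.filter_cons,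
            Bool.eq_false_iff.mpr hk]
        simp
      · exact hdrop1
  · simp only [h, if_neg, not_false_iff]
    rw [htake, List.take_of_length_le (by omega)]

-- ===== VERDICT (by name: the statement is the Claim_ definition above) =====
theorem deleteEdgeFromPath_spec : Claim_equal_deleteEdgeFromPath := by
  intro Q node _ _
  unfold Spec_deleteEdgeFromPath deleteEdgeFromPath deleteEdgeFromPath_alt
  rw [delLoopA_eq_filter]
  rw [compactLoopB_take node Q 0 Q 0 (le_refl 0) rfl (by simp) rfl]
  simp
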